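-- pv_equiv track=rewrite | github.com/pypi-data/pypi-mirror-174 | packages/gromologist/gromologist-0.240-py3-none-any.whl/gromologist/Parser.py | _parse_sel_string
-- ===== SOURCE A (Python) =====
-- def _parse_sel_string(selection_string):
--     # TODO add same residue as, within ... of, pbwithin ... of as operators
--     parenth_ranges = []
--     operators = []
--     opened_parenth = 0
--     beginning = 0
--     for nc, char in enumerate(selection_string):
--         if char == '(':
--             opened_parenth += 1
--             if beginning == 0:
--                 beginning = nc
--         elif char == ')':
--             opened_parenth -= 1
--             end = nc
--             if opened_parenth == 0:
--                 parenth_ranges.append((beginning, end))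
--                 beginning = 0
--         if opened_parenth < 0:
--             raise ValueError("Improper use of parentheses in selection string {}".format(selection_string))
--         if selection_string[nc:nc + 5] == " and " and opened_parenth == 0:
--             operators.append((nc, nc + 5))
--         if selection_string[nc:nc + 4] == " or " and opened_parenth == 0:
--             operators.append((nc, nc + 4))
--         if (selection_string[nc:nc + 7] == "within " or selection_string[nc:nc + 9] == "pbwithin ") and opened_parenth == 0:
--             ending = selection_string.find(" of")
--             operators.append((nc, ending + 4))
--         if selection_string[nc:nc+16] == "same residue as ":
--             operators.append((nc, nc + 16))
--     if opened_parenth != 0: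
--         raise ValueError("Improper use of parentheses in selection string {}".format(selection_string))
--     return parenth_ranges, operators
-- ===== SOURCE B (Python) =====
-- def _parse_sel_string(selection_string):
--     # Pass 1: build a depth-before-each-char array and the top-level parenthesis ranges.
--     depth_before = []
--     parenth_ranges = []
--     d = 0
--     beginning = 0
--     for i, ch in enumerate(selection_string):
--         depth_before.append(d)
--         if ch == '(':
--             if beginning == 0:
--                 beginning = i
--             d += 1
--         elif ch == ')':
--             d -= 1
--             if d < 0:
--                 raise ValueError("Improper use of parentheses in selection string {}".format(selection_string))
--             if d == 0:
--                 parenth_ranges.append((beginning, i))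
--                 beginning = 0
--     if d != 0:
--         raise ValueError("Improper use of parentheses in selection string {}".format(selection_string))
--     # Pass 2: emit operators using the precomputed depth array.
--     of_end = selection_string.find(" of") + 4
--     operators = []
--     for i in range(len(selection_string)):
--         if depth_before[i] == 0:
--             if selection_string.startswith(" and ", i):
--                 operators.append((i, i + 5))
--             elif selection_string.startswith(" or ", i):
--                 operators.append((i, i + 4))
--             elif selection_string.startswith("within ", i) or selection_string.startswith("pbwithin ", i):
--                 operators.append((i, of_end))
--         if selection_string.startswith("same residue as ", i):
--             operators.append((i, i + 16))
--     return parenth_ranges, operators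
-- ===== Notes on version B (the rewrite author's own statement) =====
-- stated objective: alternative
-- what changed: A's single fused scan (running parenthesis counter consulted by inline slice comparisons at every index) is split into two passes: pass 1 builds a depth-before-each-char array plus the top-level parenthesis ranges, pass 2 reads that array and uses startswith to emit the operators; the shared end position of the within/pbwithin operators is computed once instead of per match.
import Mathlib
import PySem

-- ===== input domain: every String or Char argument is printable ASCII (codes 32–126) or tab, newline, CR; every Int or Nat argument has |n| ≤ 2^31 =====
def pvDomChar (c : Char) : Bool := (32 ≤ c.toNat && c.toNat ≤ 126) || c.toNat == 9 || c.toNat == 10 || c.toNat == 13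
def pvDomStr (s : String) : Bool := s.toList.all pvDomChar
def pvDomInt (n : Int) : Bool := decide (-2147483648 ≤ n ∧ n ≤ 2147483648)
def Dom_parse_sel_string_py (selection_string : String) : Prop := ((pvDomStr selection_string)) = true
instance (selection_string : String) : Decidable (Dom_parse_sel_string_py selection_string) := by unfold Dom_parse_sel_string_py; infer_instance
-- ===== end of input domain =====

-- B replaces A's single fused scan by two passes: pass 1 builds a depth-before-each-char array plus the
-- top-level parenthesis ranges, pass 2 reads that array to emit the operators (objective: alternative decomposition).

-- ===== PORT A =====
def pvAgo (s : String) : List Char → Int → Int → Int → List (Int × Int) → List (Int × Int) → (List (Int × Int)) × (List (Int × Int))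
  | [], _, _, _, pr, ops => (pr, ops)
  | c :: rest, nc, opened, beginning, pr, ops =>
    let st :=
      if c = '(' then ((opened + 1 : Int), if beginning = 0 then nc else beginning, pr)
      else if c = ')' then
        (if opened - 1 = 0 then ((opened - 1 : Int), (0 : Int), pr ++ [(beginning, nc)])
         else (opened - 1, beginning, pr))
      else (opened, beginning, pr)
    let opened := st.1
    let beginning := st.2.1
    let pr := st.2.2
    let l := c :: rest
    let ops := if l.take 5 = [' ', 'a', 'n', 'd', ' '] ∧ opened = 0 then ops ++ [(nc, nc + 5)] else ops
    let ops := if l.take 4 = [' ', 'o', 'r', ' '] ∧ opened = 0 then ops ++ [(nc, nc + 4)] else ops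
    let ops := if (l.take 7 = ['w', 'i', 't', 'h', 'i', 'n', ' '] ∨ l.take 9 = ['p', 'b', 'w', 'i', 't', 'h', 'i', 'n', ' ']) ∧ opened = 0
               then ops ++ [(nc, PySem.Str.find s " of" + 4)] else ops
    let ops := if l.take 16 = ['s', 'a', 'm', 'e', ' ', 'r', 'e', 's', 'i', 'd', 'u', 'e', ' ', 'a', 's', ' ']
               then ops ++ [(nc, nc + 16)] else ops
    pvAgo s rest (nc + 1) opened beginning pr ops

def parse_sel_string_py (selection_string : String) : (List (Int × Int)) × (List (Int × Int)) :=
  pvAgo selection_string selection_string.toList 0 0 0 [] []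

-- ===== PORT B =====
-- pass 1: depth-before-each-char array + top-level parenthesis ranges
def pvBpass1 : List Char → Int → Int → Int → List Int → List (Int × Int) → List Int × List (Int × Int)
  | [], _, _, _, db, pr => (db, pr)
  | c :: rest, i, d, beg, db, pr =>
    let db := db ++ [d]
    if c = '(' then
      pvBpass1 rest (i + 1) (d + 1) (if beg = 0 then i else beg) db pr
    else if c = ')' then
      let d := d - 1
      if d = 0 then pvBpass1 rest (i + 1) d 0 db (pr ++ [(beg, i)])
      else pvBpass1 rest (i + 1) d beg db pr
    else pvBpass1 rest (i + 1) d beg db pr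

-- pass 2: operators from the precomputed depth array (startswith at index i = isPrefixOf on the suffix)
def pvBpass2 : Int → List Int → List Char → Int → List (Int × Int) → List (Int × Int)
  | _, [], _, _, ops => ops
  | e, d :: ds, l, i, ops =>
    let ops :=
      if d = 0 then
        if [' ', 'a', 'n', 'd', ' '].isPrefixOf l then ops ++ [(i, i + 5)]
        else if [' ', 'o', 'r', ' '].isPrefixOf l then ops ++ [(i, i + 4)]
        else if ['w', 'i', 't', 'h', 'i', 'n', ' '].isPrefixOf l ∨ ['p', 'b', 'w', 'i', 't', 'h', 'i', 'n', ' '].isPrefixOf l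
             then ops ++ [(i, e)]
        else ops
      else ops
    let ops := if ['s', 'a', 'm', 'e', ' ', 'r', 'e', 's', 'i', 'd', 'u', 'e', ' ', 'a', 's', ' '].isPrefixOf l
               then ops ++ [(i, i + 16)] else ops
    pvBpass2 e ds l.tail (i + 1) ops

def parse_sel_string_py_alt (selection_string : String) : (List (Int × Int)) × (List (Int × Int)) :=
  let r := pvBpass1 selection_string.toList 0 0 0 [] []
  let of_end := PySem.Str.find selection_string " of" + 4
  (r.2, pvBpass2 of_end r.1 selection_string.toList 0 [])

-- ===== PRECONDITION & SPEC =====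
-- Pre_ excludes exactly the ill-parenthesised strings, on which the Python A (and B alike) raises ValueError:
-- some prefix closes more parentheses than it opens, or the overall counts are unbalanced.
def Pre_parse_sel_string_py (selection_string : String) : Prop :=
  (∀ i, i ≤ selection_string.toList.length →
      ((selection_string.toList.take i).count ')' : Int) ≤ ((selection_string.toList.take i).count '(' : Int)) ∧
  selection_string.toList.count '(' = selection_string.toList.count ')'
instance (selection_string : String) : Decidable (Pre_parse_sel_string_py selection_string) := by
  unfold Pre_parse_sel_string_py; infer_instance

def pvWitness_parse_sel_string_py : String := "(resid 1) and name CA"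

def Spec_parse_sel_string_py (selection_string : String) (out : (List (Int × Int)) × (List (Int × Int))) : Prop :=
  out = parse_sel_string_py_alt selection_string
instance (selection_string : String) (out : (List (Int × Int)) × (List (Int × Int))) : Decidable (Spec_parse_sel_string_py selection_string out) := by
  unfold Spec_parse_sel_string_py; infer_instance

-- ===== CLAIM (what is proved, stated in full; the proofs are below) =====
def Claim_equal_parse_sel_string_py : Prop := ∀ (selection_string : String), Dom_parse_sel_string_py selection_string → Pre_parse_sel_string_py selection_string → Spec_parse_sel_string_py selection_string (parse_sel_string_py selection_string)

-- ===== LEMMAS AND PROOFS =====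

theorem pv_isPrefixOf_eq_take (kw l : List Char) : (kw.isPrefixOf l = true) = (l.take kw.length = kw) := by
  rw [List.isPrefixOf_iff_prefix, List.prefix_iff_eq_take]
  exact propext eq_comm

theorem pv_take_clash {l : List Char} {a b : Nat} {ka kb : List Char} (hab : a ≤ b)
    (hkb : kb.take a ≠ ka) (hA : l.take a = ka) (hB : l.take b = kb) : False := by
  apply hkb
  rw [← hB, List.take_take, Nat.min_eq_left hab, hA]

theorem pv_pass1_acc (l : List Char) (i d beg : Int) (db : List Int) (pr : List (Int × Int)) :
    pvBpass1 l i d beg db pr =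
      (db ++ (pvBpass1 l i d beg [] []).1, pr ++ (pvBpass1 l i d beg [] []).2) := by
  induction l generalizing i d beg db pr with
  | nil => simp [pvBpass1]
  | cons c rest ih =>
    simp only [pvBpass1, List.nil_append]
    split_ifs <;>
      rw [ih, ih _ _ _ [d]] <;> try rw [ih _ _ _ [d] [(beg, i)]]
    all_goals simp [List.append_assoc]

theorem pv_main (s : String) (l : List Char) (i d beg : Int) (pr ops : List (Int × Int)) :
    pvAgo s l i d beg pr ops =
      (pr ++ (pvBpass1 l i d beg [] []).2,
       pvBpass2 (PySem.Str.find s " of" + 4) (pvBpass1 l i d beg [] []).1 l i ops) := by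
  induction l generalizing i d beg pr ops with
  | nil => simp [pvAgo, pvBpass1, pvBpass2]
  | cons c rest ih =>
    by_cases hpo : c = '('
    · subst hpo
      simp only [pvAgo, pvBpass1, List.nil_append]
      rw [pv_pass1_acc _ _ _ _ [d] []]
      simp [pvBpass2, List.isPrefixOf, ih]
    · by_cases hpc : c = ')'
      · subst hpc
        simp only [pvAgo, pvBpass1, List.nil_append, if_neg (by decide : ¬ (')' = '('))]
        by_cases hz : d - 1 = 0
        · rw [if_pos hz, if_pos hz, pv_pass1_acc _ _ _ _ [d] [(beg, i)]]
          simp [pvBpass2, List.isPrefixOf, ih]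
        · rw [if_neg hz, if_neg hz, pv_pass1_acc _ _ _ _ [d] []]
          simp [pvBpass2, List.isPrefixOf, ih]
      · -- non-parenthesis character: state unchanged, keyword checks live
        simp only [pvAgo, pvBpass1, List.nil_append, if_neg hpo, if_neg hpc]
        rw [pv_pass1_acc _ _ _ _ [d] []]
        simp only [List.singleton_append, pvBpass2, List.tail_cons, List.nil_append]
        rw [ih]
        simp only [pv_isPrefixOf_eq_take, List.length_cons, List.length_nil, Nat.reduceAdd]
        by_cases hd : d = 0
        · by_cases h5 : List.take 5 (c :: rest) = [' ', 'a', 'n', 'd', ' ']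
          · have n4 : ¬ List.take 4 (c :: rest) = [' ', 'o', 'r', ' '] := fun h =>
              pv_take_clash (by norm_num) (by decide) h h5
            have n7 : ¬ List.take 7 (c :: rest) = ['w', 'i', 't', 'h', 'i', 'n', ' '] := fun h =>
              pv_take_clash (by norm_num) (by decide) h5 h
            have n9 : ¬ List.take 9 (c :: rest) = ['p', 'b', 'w', 'i', 't', 'h', 'i', 'n', ' '] := fun h =>
              pv_take_clash (by norm_num) (by decide) h5 h
            have n16 : ¬ List.take 16 (c :: rest) = ['s', 'a', 'm', 'e', ' ', 'r', 'e', 's', 'i', 'd', 'u', 'e', ' ', 'a', 's', ' '] := fun h =>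
              pv_take_clash (by norm_num) (by decide) h5 h
            rw [if_pos (And.intro h5 hd),
                if_neg (show ¬ (List.take 4 (c :: rest) = [' ', 'o', 'r', ' '] ∧ d = 0) from fun h => n4 h.1),
                if_neg (show ¬ ((List.take 7 (c :: rest) = ['w', 'i', 't', 'h', 'i', 'n', ' '] ∨ List.take 9 (c :: rest) = ['p', 'b', 'w', 'i', 't', 'h', 'i', 'n', ' ']) ∧ d = 0) from fun h => Or.elim h.1 n7 n9),
                if_neg n16, if_pos hd, if_pos h5, if_neg n16]
          · by_cases h4 : List.take 4 (c :: rest) = [' ', 'o', 'r', ' ']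
            · have n7 : ¬ List.take 7 (c :: rest) = ['w', 'i', 't', 'h', 'i', 'n', ' '] := fun h =>
                pv_take_clash (by norm_num) (by decide) h4 h
              have n9 : ¬ List.take 9 (c :: rest) = ['p', 'b', 'w', 'i', 't', 'h', 'i', 'n', ' '] := fun h =>
                pv_take_clash (by norm_num) (by decide) h4 h
              have n16 : ¬ List.take 16 (c :: rest) = ['s', 'a', 'm', 'e', ' ', 'r', 'e', 's', 'i', 'd', 'u', 'e', ' ', 'a', 's', ' '] := fun h =>
                pv_take_clash (by norm_num) (by decide) h4 h
              rw [if_neg (show ¬ (List.take 5 (c :: rest) = [' ', 'a', 'n', 'd', ' '] ∧ d = 0) from fun h => h5 h.1),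
                  if_pos (And.intro h4 hd),
                  if_neg (show ¬ ((List.take 7 (c :: rest) = ['w', 'i', 't', 'h', 'i', 'n', ' '] ∨ List.take 9 (c :: rest) = ['p', 'b', 'w', 'i', 't', 'h', 'i', 'n', ' ']) ∧ d = 0) from fun h => Or.elim h.1 n7 n9),
                  if_neg n16, if_pos hd, if_neg h5, if_pos h4, if_neg n16]
            · by_cases h7 : List.take 7 (c :: rest) = ['w', 'i', 't', 'h', 'i', 'n', ' ']
              · have n16 : ¬ List.take 16 (c :: rest) = ['s', 'a', 'm', 'e', ' ', 'r', 'e', 's', 'i', 'd', 'u', 'e', ' ', 'a', 's', ' '] := fun h =>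
                  pv_take_clash (by norm_num) (by decide) h7 h
                rw [if_neg (show ¬ (List.take 5 (c :: rest) = [' ', 'a', 'n', 'd', ' '] ∧ d = 0) from fun h => h5 h.1),
                    if_neg (show ¬ (List.take 4 (c :: rest) = [' ', 'o', 'r', ' '] ∧ d = 0) from fun h => h4 h.1),
                    if_pos (And.intro (Or.inl h7) hd),
                    if_neg n16, if_pos hd, if_neg h5, if_neg h4, if_pos (Or.inl h7), if_neg n16]
              · by_cases h9 : List.take 9 (c :: rest) = ['p', 'b', 'w', 'i', 't', 'h', 'i', 'n', ' ']
                · have n16 : ¬ List.take 16 (c :: rest) = ['s', 'a', 'm', 'e', ' ', 'r', 'e', 's', 'i', 'd', 'u', 'e', ' ', 'a', 's', ' '] := fun h =>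
                    pv_take_clash (by norm_num) (by decide) h9 h
                  rw [if_neg (show ¬ (List.take 5 (c :: rest) = [' ', 'a', 'n', 'd', ' '] ∧ d = 0) from fun h => h5 h.1),
                      if_neg (show ¬ (List.take 4 (c :: rest) = [' ', 'o', 'r', ' '] ∧ d = 0) from fun h => h4 h.1),
                      if_pos (And.intro (Or.inr h9) hd),
                      if_neg n16, if_pos hd, if_neg h5, if_neg h4, if_pos (Or.inr h9), if_neg n16]
                · by_cases h16 : List.take 16 (c :: rest) = ['s', 'a', 'm', 'e', ' ', 'r', 'e', 's', 'i', 'd', 'u', 'e', ' ', 'a', 's', ' ']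
                  · rw [if_neg (show ¬ (List.take 5 (c :: rest) = [' ', 'a', 'n', 'd', ' '] ∧ d = 0) from fun h => h5 h.1),
                        if_neg (show ¬ (List.take 4 (c :: rest) = [' ', 'o', 'r', ' '] ∧ d = 0) from fun h => h4 h.1),
                        if_neg (show ¬ ((List.take 7 (c :: rest) = ['w', 'i', 't', 'h', 'i', 'n', ' '] ∨ List.take 9 (c :: rest) = ['p', 'b', 'w', 'i', 't', 'h', 'i', 'n', ' ']) ∧ d = 0) from fun h => Or.elim h.1 h7 h9),
                        if_pos h16, if_pos hd, if_neg h5, if_neg h4,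
                        if_neg (show ¬ (List.take 7 (c :: rest) = ['w', 'i', 't', 'h', 'i', 'n', ' '] ∨ List.take 9 (c :: rest) = ['p', 'b', 'w', 'i', 't', 'h', 'i', 'n', ' ']) from fun h => Or.elim h h7 h9), if_pos h16]
                  · rw [if_neg (show ¬ (List.take 5 (c :: rest) = [' ', 'a', 'n', 'd', ' '] ∧ d = 0) from fun h => h5 h.1),
                        if_neg (show ¬ (List.take 4 (c :: rest) = [' ', 'o', 'r', ' '] ∧ d = 0) from fun h => h4 h.1),
                        if_neg (show ¬ ((List.take 7 (c :: rest) = ['w', 'i', 't', 'h', 'i', 'n', ' '] ∨ List.take 9 (c :: rest) = ['p', 'b', 'w', 'i', 't', 'h', 'i', 'n', ' ']) ∧ d = 0) from fun h => Or.elim h.1 h7 h9),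
                        if_neg h16, if_pos hd, if_neg h5, if_neg h4,
                        if_neg (show ¬ (List.take 7 (c :: rest) = ['w', 'i', 't', 'h', 'i', 'n', ' '] ∨ List.take 9 (c :: rest) = ['p', 'b', 'w', 'i', 't', 'h', 'i', 'n', ' ']) from fun h => Or.elim h h7 h9), if_neg h16]
        · by_cases h16 : List.take 16 (c :: rest) = ['s', 'a', 'm', 'e', ' ', 'r', 'e', 's', 'i', 'd', 'u', 'e', ' ', 'a', 's', ' ']
          · rw [if_neg (show ¬ (List.take 5 (c :: rest) = [' ', 'a', 'n', 'd', ' '] ∧ d = 0) from fun h => hd h.2),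
                if_neg (show ¬ (List.take 4 (c :: rest) = [' ', 'o', 'r', ' '] ∧ d = 0) from fun h => hd h.2),
                if_neg (show ¬ ((List.take 7 (c :: rest) = ['w', 'i', 't', 'h', 'i', 'n', ' '] ∨ List.take 9 (c :: rest) = ['p', 'b', 'w', 'i', 't', 'h', 'i', 'n', ' ']) ∧ d = 0) from fun h => hd h.2),
                if_pos h16, if_neg hd, if_pos h16]
          · rw [if_neg (show ¬ (List.take 5 (c :: rest) = [' ', 'a', 'n', 'd', ' '] ∧ d = 0) from fun h => hd h.2),
                if_neg (show ¬ (List.take 4 (c :: rest) = [' ', 'o', 'r', ' '] ∧ d = 0) from fun h => hd h.2),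
                if_neg (show ¬ ((List.take 7 (c :: rest) = ['w', 'i', 't', 'h', 'i', 'n', ' '] ∨ List.take 9 (c :: rest) = ['p', 'b', 'w', 'i', 't', 'h', 'i', 'n', ' ']) ∧ d = 0) from fun h => hd h.2),
                if_neg h16, if_neg hd, if_neg h16]

-- ===== VERDICT (by name: the statement is the Claim_ definition above) =====
theorem parse_sel_string_py_spec : Claim_equal_parse_sel_string_py := by
  intro s _ _
  show parse_sel_string_py s = parse_sel_string_py_alt s
  simp [parse_sel_string_py, parse_sel_string_py_alt, pv_main]
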